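-- pv_equiv track=rewrite | github.com/OscarNavarr/naval_battle | score.py | calculScore
-- ===== SOURCE A (Python) =====
-- def calculScore(grid):
--     """
--     Calculates and returns the score for the given grid.
--     +700 points per hit ('h')
--     -100 points per miss ('m')
--     """
--     score = 0
--     for row in grid:
--         for cell in row:
--             if cell == 'h':
--                 score += 700
--             elif cell == 'm':
--                 score -= 100
--     return score
-- ===== SOURCE B (Python) =====
-- def calculScore(grid):
--     hits = sum(row.count('h') for row in grid)
--     misses = sum(row.count('m') for row in grid)
--     return 700 * hits - 100 * misses
-- ===== Notes on version B (the rewrite author's own statement) =====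
-- stated objective: simpler
-- what changed: Replaced the fused per-cell branch-and-accumulate loop by counting 'h' and 'm' occurrences per row and combining them with the closed-form 700*hits - 100*misses.
import Mathlib
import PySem

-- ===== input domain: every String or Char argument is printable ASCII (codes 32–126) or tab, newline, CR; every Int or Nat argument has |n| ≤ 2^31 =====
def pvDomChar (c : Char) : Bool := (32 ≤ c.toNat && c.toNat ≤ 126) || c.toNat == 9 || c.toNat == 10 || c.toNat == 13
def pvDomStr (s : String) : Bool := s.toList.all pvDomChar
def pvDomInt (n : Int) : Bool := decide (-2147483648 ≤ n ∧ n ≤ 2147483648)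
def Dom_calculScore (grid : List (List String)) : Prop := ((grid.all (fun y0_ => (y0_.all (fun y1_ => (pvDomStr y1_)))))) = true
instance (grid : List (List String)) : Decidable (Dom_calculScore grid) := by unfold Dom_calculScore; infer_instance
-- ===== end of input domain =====

-- ===== PORT A =====
-- B separates counting from scoring: count 'h' and 'm' per row, then a closed-form combine.
def calculScore (grid : List (List String)) : Int :=
  grid.foldl (fun score row =>
    row.foldl (fun score cell =>
      if cell = "h" then score + 700
      else if cell = "m" then score - 100
      else score) score) 0

-- ===== PORT B =====
def calculScore_alt (grid : List (List String)) : Int :=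
  let hits : Int := (grid.map (fun row => PySem.List.count row "h")).sum
  let misses : Int := (grid.map (fun row => PySem.List.count row "m")).sum
  700 * hits - 100 * misses

-- ===== PRECONDITION & SPEC =====
def Spec_calculScore (grid : List (List String)) (out : Int) : Prop := out = calculScore_alt grid
instance (grid : List (List String)) (out : Int) : Decidable (Spec_calculScore grid out) := by unfold Spec_calculScore; infer_instance

-- ===== CLAIM (what is proved, stated in full; the proofs are below) =====
def Claim_equal_calculScore : Prop := ∀ (grid : List (List String)), Dom_calculScore grid → Spec_calculScore grid (calculScore grid)

-- ===== LEMMAS AND PROOFS =====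

-- ===== VERDICT (by name: the statement is the Claim_ definition above) =====
lemma row_foldl (row : List String) (s : Int) :
    row.foldl (fun score cell =>
      if cell = "h" then score + 700
      else if cell = "m" then score - 100
      else score) s
    = s + 700 * (PySem.List.count row "h" : Int) - 100 * (PySem.List.count row "m" : Int) := by
  induction row generalizing s with
  | nil => simp [PySem.List.count]
  | cons c t ih =>
    simp only [List.foldl_cons, ih, PySem.List.count, List.count_cons]
    split_ifs with h1 h2 <;> simp_all <;> ring

lemma grid_foldl (grid : List (List String)) (s : Int) :
    grid.foldl (fun score row =>
      row.foldl (fun score cell =>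
        if cell = "h" then score + 700
        else if cell = "m" then score - 100
        else score) score) s
    = s + 700 * ((grid.map (fun row => PySem.List.count row "h")).sum : Int)
        - 100 * ((grid.map (fun row => PySem.List.count row "m")).sum : Int) := by
  induction grid generalizing s with
  | nil => simp
  | cons r t ih =>
    rw [List.foldl_cons, row_foldl, ih]
    simp only [List.map_cons, List.sum_cons]
    push_cast; ring

theorem calculScore_spec : Claim_equal_calculScore := by
  intro grid _
  unfold Spec_calculScore calculScore calculScore_alt
  rw [grid_foldl]; push_cast; ring
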